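-- pv_equiv track=rewrite | github.com/amazon-science/CTF-Dojo | forge/ctf_forge.py | get_category_specific_guidelines
-- ===== SOURCE A (Python) =====
-- from typing import Dict, List, Optional, Any
--
-- def get_category_specific_guidelines(category: str, task_tags: List[str]) -> str:
--     """Generate category-specific guidelines for Dockerfile creation."""
--
--     category_lower = category.lower() if category else ""
--     tags_lower = [tag.lower() for tag in task_tags]
--
--     # Determine category from various sources
--     if category_lower == "web" or any("web" in tag for tag in tags_lower):
--         return """
-- WEB CHALLENGES:
-- - Install web server (apache2, nginx, or built-in server for frameworks)
-- - Install appropriate language runtime (php, python3, node.js, etc.)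
-- - If using Python, install python3 and python-is-python3 packages
-- - Copy web files to appropriate directory (/var/www/html for Apache)
-- - Configure web server to serve files properly
-- - Expose port 80 or 8080 for HTTP access
-- - Use COPY for static files, ensure proper permissions
-- - Example: COPY *.php /var/www/html/ && chmod 644 /var/www/html/*.php
-- - Start web server with CMD ["apache2ctl", "-D", "FOREGROUND"] or similar"""
--
--     elif category_lower == "pwn" or any("pwn" in tag for tag in tags_lower):
--         return """
-- PWN CHALLENGES:
-- - Install socat for network service hosting.
-- - Follow the general guidelines for hosting executables using a `run.sh` wrapper for maximum stability.
-- - Expose port 1337 (standard for pwn challenges).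
-- - May need additional libraries for binary execution, such as libc6:i386 for 32-bit binaries."""
--
--     elif category_lower == "crypto" or any("crypto" in tag for tag in tags_lower):
--
--         return """
-- CRYPTO CHALLENGES:
-- - Copy Python scripts to /challenge/ directory
-- - Install socat if hosting a crypto service
-- - Expose appropriate port (often 1337)
-- - Use CMD to run the crypto service
-- - Example: CMD ["python3", "/challenge/crypto_server.py"]
-- - Consider installing specific versions of crypto libraries if needed"""
--
--     elif category_lower == "rev" or any("rev" in tag for tag in tags_lower):
--         return """
-- REVERSE ENGINEERING CHALLENGES:
-- - Copy binary files to /challenge/ directory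
-- - Set executable permissions for binaries
-- - May need specific libraries or runtime environments
-- - If hosting a service, use socat with appropriate port
-- - Example: COPY binary /challenge/ && chmod +x /challenge/binary
-- - Consider if challenge needs to run as service or just provide downloadable binary"""
--
--     elif category_lower == "forensics" or any("forensics" in tag for tag in tags_lower):
--         return """
-- FORENSICS CHALLENGES:
-- - Copy evidence files to appropriate directory
-- - Install analysis tools if challenge provides online analysis
-- - May not need network service - could be file download only
-- - If hosting service, use appropriate web server
-- - Example: COPY evidence.* /challenge/
-- - Consider file integrity and proper permissions"""
--
--     else:  # misc or unknown
--         return """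
-- MISCELLANEOUS CHALLENGES:
-- - Analyze available files to determine service type
-- - Install appropriate runtime (python3 with python-is-python3, node.js, etc.) based on file types
-- - Copy all necessary files to /challenge/ directory
-- - Set appropriate permissions for executable files
-- - Choose port based on service type (1337 for general services)
-- - Use socat for simple TCP services or appropriate server for web-based challenges"""
-- ===== SOURCE B (Python) =====
-- KEYWORDS = ["web", "pwn", "crypto", "rev", "forensics"]
--
-- TEXTS = [
--     """
-- WEB CHALLENGES:
-- - Install web server (apache2, nginx, or built-in server for frameworks)
-- - Install appropriate language runtime (php, python3, node.js, etc.)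
-- - If using Python, install python3 and python-is-python3 packages
-- - Copy web files to appropriate directory (/var/www/html for Apache)
-- - Configure web server to serve files properly
-- - Expose port 80 or 8080 for HTTP access
-- - Use COPY for static files, ensure proper permissions
-- - Example: COPY *.php /var/www/html/ && chmod 644 /var/www/html/*.php
-- - Start web server with CMD ["apache2ctl", "-D", "FOREGROUND"] or similar""",
--     """
-- PWN CHALLENGES:
-- - Install socat for network service hosting.
-- - Follow the general guidelines for hosting executables using a `run.sh` wrapper for maximum stability.
-- - Expose port 1337 (standard for pwn challenges).
-- - May need additional libraries for binary execution, such as libc6:i386 for 32-bit binaries.""",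
--     """
-- CRYPTO CHALLENGES:
-- - Copy Python scripts to /challenge/ directory
-- - Install socat if hosting a crypto service
-- - Expose appropriate port (often 1337)
-- - Use CMD to run the crypto service
-- - Example: CMD ["python3", "/challenge/crypto_server.py"]
-- - Consider installing specific versions of crypto libraries if needed""",
--     """
-- REVERSE ENGINEERING CHALLENGES:
-- - Copy binary files to /challenge/ directory
-- - Set executable permissions for binaries
-- - May need specific libraries or runtime environments
-- - If hosting a service, use socat with appropriate port
-- - Example: COPY binary /challenge/ && chmod +x /challenge/binary
-- - Consider if challenge needs to run as service or just provide downloadable binary""",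
--     """
-- FORENSICS CHALLENGES:
-- - Copy evidence files to appropriate directory
-- - Install analysis tools if challenge provides online analysis
-- - May not need network service - could be file download only
-- - If hosting service, use appropriate web server
-- - Example: COPY evidence.* /challenge/
-- - Consider file integrity and proper permissions""",
--     """
-- MISCELLANEOUS CHALLENGES:
-- - Analyze available files to determine service type
-- - Install appropriate runtime (python3 with python-is-python3, node.js, etc.) based on file types
-- - Copy all necessary files to /challenge/ directory
-- - Set appropriate permissions for executable files
-- - Choose port based on service type (1337 for general services)
-- - Use socat for simple TCP services or appropriate server for web-based challenges""",
-- ]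
--
--
-- def _tag_index(tag_lower):
--     """Smallest keyword priority matched by this tag (len(KEYWORDS) if none)."""
--     for i, k in enumerate(KEYWORDS):
--         if k in tag_lower:
--             return i
--     return len(KEYWORDS)
--
--
-- def get_category_specific_guidelines(category, task_tags):
--     # Priority-selection: the if/elif chain picks the keyword of minimum
--     # index that matches, so compute that minimum directly, tag by tag.
--     cl = category.lower() if category else ""
--     best = KEYWORDS.index(cl) if cl in KEYWORDS else len(KEYWORDS)
--     for tag in task_tags:
--         best = min(best, _tag_index(tag.lower()))
--     return TEXTS[best]
-- ===== Notes on version B (the rewrite author's own statement) =====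
-- stated objective: alternative
-- what changed: Replaces A's five-branch if/elif keyword chain with a priority-minimum computation: a tag-major scan folds the minimum matching keyword index (first-match over keywords equals the minimum index), then selects the text from an array.
import Mathlib
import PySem

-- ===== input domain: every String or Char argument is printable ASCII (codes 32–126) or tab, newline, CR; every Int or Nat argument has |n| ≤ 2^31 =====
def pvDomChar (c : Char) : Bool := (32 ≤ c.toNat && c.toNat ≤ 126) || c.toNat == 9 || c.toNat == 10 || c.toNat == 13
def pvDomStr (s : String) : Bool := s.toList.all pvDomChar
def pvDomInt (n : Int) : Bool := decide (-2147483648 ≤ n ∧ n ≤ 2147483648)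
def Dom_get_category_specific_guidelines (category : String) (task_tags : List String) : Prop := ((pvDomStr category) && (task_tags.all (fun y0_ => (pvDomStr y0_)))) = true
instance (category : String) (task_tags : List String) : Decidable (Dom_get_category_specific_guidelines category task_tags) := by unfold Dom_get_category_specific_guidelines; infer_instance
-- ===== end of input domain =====

-- B replaces A's if/elif keyword chain by a priority-minimum computation over a tag-major scan
-- plus array selection (objective: alternative; same cost).

-- Shared string constants (identical literals appear in both Pythons):
def pvWebText : String := "\nWEB CHALLENGES:\n- Install web server (apache2, nginx, or built-in server for frameworks)\n- Install appropriate language runtime (php, python3, node.js, etc.)\n- If using Python, install python3 and python-is-python3 packages\n- Copy web files to appropriate directory (/var/www/html for Apache)\n- Configure web server to serve files properly\n- Expose port 80 or 8080 for HTTP access\n- Use COPY for static files, ensure proper permissions\n- Example: COPY *.php /var/www/html/ && chmod 644 /var/www/html/*.php\n- Start web server with CMD [\"apache2ctl\", \"-D\", \"FOREGROUND\"] or similar"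

def pvPwnText : String := "\nPWN CHALLENGES:\n- Install socat for network service hosting.\n- Follow the general guidelines for hosting executables using a `run.sh` wrapper for maximum stability.\n- Expose port 1337 (standard for pwn challenges).\n- May need additional libraries for binary execution, such as libc6:i386 for 32-bit binaries."

def pvCryptoText : String := "\nCRYPTO CHALLENGES:\n- Copy Python scripts to /challenge/ directory\n- Install socat if hosting a crypto service\n- Expose appropriate port (often 1337)\n- Use CMD to run the crypto service\n- Example: CMD [\"python3\", \"/challenge/crypto_server.py\"]\n- Consider installing specific versions of crypto libraries if needed"

def pvRevText : String := "\nREVERSE ENGINEERING CHALLENGES:\n- Copy binary files to /challenge/ directory\n- Set executable permissions for binaries\n- May need specific libraries or runtime environments\n- If hosting a service, use socat with appropriate port\n- Example: COPY binary /challenge/ && chmod +x /challenge/binary\n- Consider if challenge needs to run as service or just provide downloadable binary"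

def pvForensicsText : String := "\nFORENSICS CHALLENGES:\n- Copy evidence files to appropriate directory\n- Install analysis tools if challenge provides online analysis\n- May not need network service - could be file download only\n- If hosting service, use appropriate web server\n- Example: COPY evidence.* /challenge/\n- Consider file integrity and proper permissions"

def pvMiscText : String := "\nMISCELLANEOUS CHALLENGES:\n- Analyze available files to determine service type\n- Install appropriate runtime (python3 with python-is-python3, node.js, etc.) based on file types\n- Copy all necessary files to /challenge/ directory\n- Set appropriate permissions for executable files\n- Choose port based on service type (1337 for general services)\n- Use socat for simple TCP services or appropriate server for web-based challenges"

-- ===== PORT A =====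
-- literal transliteration of A's if/elif chain
def get_category_specific_guidelines (category : String) (task_tags : List String) : String :=
  let category_lower := if category ≠ "" then PySem.Str.lower category else ""
  let tags_lower := task_tags.map (fun tag => PySem.Str.lower tag)
  if category_lower == "web" || tags_lower.any (fun tag => PySem.Str.isIn "web" tag) then
    pvWebText
  else if category_lower == "pwn" || tags_lower.any (fun tag => PySem.Str.isIn "pwn" tag) then
    pvPwnText
  else if category_lower == "crypto" || tags_lower.any (fun tag => PySem.Str.isIn "crypto" tag) then
    pvCryptoText
  else if category_lower == "rev" || tags_lower.any (fun tag => PySem.Str.isIn "rev" tag) then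
    pvRevText
  else if category_lower == "forensics" || tags_lower.any (fun tag => PySem.Str.isIn "forensics" tag) then
    pvForensicsText
  else
    pvMiscText

-- ===== PORT B =====
-- B's keyword priority list and text array (TEXTS[5] is the misc fallback)
def pvKeywords : List String := ["web", "pwn", "crypto", "rev", "forensics"]

def pvTexts : List String :=
  [pvWebText, pvPwnText, pvCryptoText, pvRevText, pvForensicsText, pvMiscText]

-- Source B's _tag_index: first keyword index contained in the lowered tag, else len(KEYWORDS)
def pvTagIndexAux (tag_lower : String) : Nat → List String → Nat
  | _, [] => pvKeywords.length
  | i, k :: rest =>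
      if PySem.Str.isIn k tag_lower then i else pvTagIndexAux tag_lower (i + 1) rest

def pvTagIndex (tag_lower : String) : Nat :=
  pvTagIndexAux tag_lower 0 pvKeywords

-- Source B's body: best = KEYWORDS.index(cl) if cl in KEYWORDS else len(KEYWORDS); fold min over tags;
-- TEXTS[best] is ported as getD (best ≤ 5 < 6 always, so the default is never used — exact)
def get_category_specific_guidelines_alt (category : String) (task_tags : List String) : String :=
  let cl := if category ≠ "" then PySem.Str.lower category else ""
  let best0 := match PySem.List.index? pvKeywords cl with
    | some i => i
    | none => pvKeywords.length
  let best := task_tags.foldl (fun b tag => min b (pvTagIndex (PySem.Str.lower tag))) best0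
  pvTexts.getD best ""

-- ===== PRECONDITION & SPEC =====
def Spec_get_category_specific_guidelines (category : String) (task_tags : List String) (out : String) : Prop := out = get_category_specific_guidelines_alt category task_tags
instance (category : String) (task_tags : List String) (out : String) : Decidable (Spec_get_category_specific_guidelines category task_tags out) := by unfold Spec_get_category_specific_guidelines; infer_instance

-- ===== CLAIM (what is proved, stated in full; the proofs are below) =====
def Claim_equal_get_category_specific_guidelines : Prop := ∀ (category : String) (task_tags : List String), Dom_get_category_specific_guidelines category task_tags → Spec_get_category_specific_guidelines category task_tags (get_category_specific_guidelines category task_tags)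

-- ===== LEMMAS AND PROOFS =====

-- first-true index of the five match bits
def pvIdx5 (b0 b1 b2 b3 b4 : Bool) : Nat :=
  if b0 then 0 else if b1 then 1 else if b2 then 2 else if b3 then 3 else if b4 then 4 else 5

theorem pvIdx5_le (b0 b1 b2 b3 b4 : Bool) : pvIdx5 b0 b1 b2 b3 b4 ≤ 5 := by
  cases b0 <;> cases b1 <;> cases b2 <;> cases b3 <;> cases b4 <;> decide

theorem pvMin_idx5 (b0 b1 b2 b3 b4 c0 c1 c2 c3 c4 : Bool) :
    min (pvIdx5 b0 b1 b2 b3 b4) (pvIdx5 c0 c1 c2 c3 c4) =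
      pvIdx5 (b0 || c0) (b1 || c1) (b2 || c2) (b3 || c3) (b4 || c4) := by
  cases b0 <;> cases b1 <;> cases b2 <;> cases b3 <;> cases b4 <;>
    cases c0 <;> cases c1 <;> cases c2 <;> cases c3 <;> cases c4 <;> decide

theorem pvTagIndex_eq (tl : String) :
    pvTagIndex tl =
      pvIdx5 (PySem.Str.isIn "web" tl) (PySem.Str.isIn "pwn" tl)
        (PySem.Str.isIn "crypto" tl) (PySem.Str.isIn "rev" tl)
        (PySem.Str.isIn "forensics" tl) := by
  simp only [pvTagIndex, pvKeywords, pvTagIndexAux, pvIdx5]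
  rfl

theorem pvBest0_eq (cl : String) :
    (match PySem.List.index? pvKeywords cl with
      | some i => i
      | none => pvKeywords.length) =
      pvIdx5 (cl == "web") (cl == "pwn") (cl == "crypto") (cl == "rev") (cl == "forensics") := by
  by_cases h0 : cl = "web"
  · subst h0; decide
  by_cases h1 : cl = "pwn"
  · subst h1; decide
  by_cases h2 : cl = "crypto"
  · subst h2; decide
  by_cases h3 : cl = "rev"
  · subst h3; decide
  by_cases h4 : cl = "forensics"
  · subst h4; decide
  have hn : PySem.List.index? pvKeywords cl = none := by
    rw [PySem.List.index?_eq_none_iff]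
    simp [pvKeywords]
    exact ⟨h0, h1, h2, h3, h4⟩
  rw [hn]
  simp [pvIdx5, pvKeywords, h0, h1, h2, h3, h4]

theorem pvFold_min (ts : List String) :
    ∀ s, s ≤ 5 →
      ts.foldl (fun b tag => min b (pvTagIndex (PySem.Str.lower tag))) s =
        min s (pvIdx5 (ts.any fun t => PySem.Str.isIn "web" (PySem.Str.lower t))
          (ts.any fun t => PySem.Str.isIn "pwn" (PySem.Str.lower t))
          (ts.any fun t => PySem.Str.isIn "crypto" (PySem.Str.lower t))
          (ts.any fun t => PySem.Str.isIn "rev" (PySem.Str.lower t))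
          (ts.any fun t => PySem.Str.isIn "forensics" (PySem.Str.lower t))) := by
  induction ts with
  | nil => intro s hs; simp [pvIdx5]; omega
  | cons t ts ih =>
      intro s hs
      simp only [List.foldl_cons, List.any_cons]
      rw [ih (min s (pvTagIndex (PySem.Str.lower t)))
        (le_trans (min_le_left _ _) hs)]
      rw [pvTagIndex_eq, min_assoc, pvMin_idx5]

theorem pvChain_getD (b0 b1 b2 b3 b4 : Bool) :
    (if b0 then pvWebText else if b1 then pvPwnText else if b2 then pvCryptoText
      else if b3 then pvRevText else if b4 then pvForensicsText else pvMiscText) =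
      pvTexts.getD (pvIdx5 b0 b1 b2 b3 b4) "" := by
  cases b0 <;> cases b1 <;> cases b2 <;> cases b3 <;> cases b4 <;> rfl

-- ===== VERDICT (by name: the statement is the Claim_ definition above) =====
set_option maxHeartbeats 1000000 in
theorem get_category_specific_guidelines_spec : Claim_equal_get_category_specific_guidelines := by
  intro category task_tags _
  show get_category_specific_guidelines category task_tags = get_category_specific_guidelines_alt category task_tags
  unfold get_category_specific_guidelines get_category_specific_guidelines_alt
  simp only [List.any_map]
  rw [pvBest0_eq, pvFold_min _ _ (pvIdx5_le _ _ _ _ _), pvMin_idx5]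
  exact pvChain_getD _ _ _ _ _
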